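-- pv_equiv track=rewrite | github.com/thegeneralgeneral/advent-of-code | day17.py | get_all_combinations_of_min_length
-- ===== SOURCE A (Python) =====
-- def get_all_combinations(container_size_list, amount):
--     if amount == 0 or not container_size_list:
--         pass
--     else:
--         if container_size_list[0] == amount:
--             yield [container_size_list[0]]
--         # Get the remaining valid combinations if we use this container
--         first_container = container_size_list[0]
--         for valid_subcomb in get_all_combinations(container_size_list[1:], amount - first_container):
--             yield [first_container] + valid_subcomb
--         # Get the valid combinations if we *don't* use this container.
--         for valid_subcomb in get_all_combinations(container_size_list[1:], amount):
--             yield valid_subcomb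
--
-- def get_all_combinations_of_min_length(container_size_list, amount):
--     min_length = 9999999
--     acceptable_results = []
--     for combo in get_all_combinations(container_size_list, amount):
--         # If this combo is smaller in length than any we've seen so far, scrap the existing list and start with this one
--         # If this combo is the same length as the minimum, add it to the list.
--         # Otherwise, continue.
--         if len(combo) < min_length:
--             acceptable_results = [combo]
--             min_length = len(combo)
--         elif len(combo) == min_length:
--             acceptable_results.append(combo)
--         else:
--             continue
--     return acceptable_results
-- ===== SOURCE B (Python) =====
-- def _sized(lst, remaining, need):
--     # all combinations of exactly `need` elements of lst summing to `remaining`,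
--     # include-first depth-first order (no slicing of results, only structural recursion)
--     if need == 0:
--         return [[]] if remaining == 0 else []
--     if len(lst) < need:
--         return []
--     first, rest = lst[0], lst[1:]
--     return [[first] + c for c in _sized(rest, remaining - first, need - 1)] + _sized(rest, remaining, need)
--
-- def get_all_combinations_of_min_length(container_size_list, amount):
--     # Iterative deepening: try sizes k = 1, 2, ...; the first size for which an
--     # exact-sum combination exists is the minimum, and only those are enumerated.
--     # The search depth is capped at 9999999, the largest combination length that
--     # counts as an acceptable result for this function.
--     if amount == 0:
--         return []
--     for k in range(1, min(len(container_size_list), 9999999) + 1):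
--         results = _sized(container_size_list, amount, k)
--         if results:
--             return results
--     return []
-- ===== Notes on version B (the rewrite author's own statement) =====
-- stated objective: faster
-- what changed: A enumerates every summing combination (recursive generator with slicing and concatenation) and then keeps the shortest ones with a streaming min-filter; B uses iterative deepening: a size-bounded, length-pruned search at k = 1, 2, ... (capped at 9999999, the largest length A accepts) that returns the first non-empty level, so only combinations up to the minimal size are ever explored.
import Mathlib
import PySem

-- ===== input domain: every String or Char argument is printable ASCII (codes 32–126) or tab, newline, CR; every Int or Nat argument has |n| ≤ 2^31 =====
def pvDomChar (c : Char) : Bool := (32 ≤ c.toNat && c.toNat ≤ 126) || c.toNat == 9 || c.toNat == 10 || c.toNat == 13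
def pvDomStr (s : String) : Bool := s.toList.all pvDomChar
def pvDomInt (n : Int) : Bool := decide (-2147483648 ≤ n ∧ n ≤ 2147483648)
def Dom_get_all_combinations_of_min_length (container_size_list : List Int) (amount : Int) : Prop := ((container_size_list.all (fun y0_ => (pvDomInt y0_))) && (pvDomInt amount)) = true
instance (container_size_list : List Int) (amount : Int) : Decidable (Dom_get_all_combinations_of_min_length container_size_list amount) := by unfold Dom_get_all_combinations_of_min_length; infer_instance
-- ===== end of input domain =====

-- B replaces A's full enumeration of every summing combination (followed by a streaming
-- minimum filter) with iterative deepening: size-bounded pruned search at k = 1, 2, …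
-- up to 9999999 (the largest combination length A accepts), returning the first
-- non-empty level.

-- ===== PORT A =====
-- generator get_all_combinations, yields collected in order
def genA (container_size_list : List Int) (amount : Int) : List (List Int) :=
  match container_size_list with
  | [] => []
  | first :: rest =>
    if amount = 0 then []
    else
      (if first = amount then [[first]] else []) ++
      ((genA rest (amount - first)).map (fun c => first :: c)) ++
      genA rest amount

-- the body of A's for-loop (min_length, acceptable_results are the state)
def stepA (st : Int × List (List Int)) (combo : List Int) : Int × List (List Int) :=
  if (combo.length : Int) < st.1 then ((combo.length : Int), [combo])
  else if (combo.length : Int) = st.1 then (st.1, st.2 ++ [combo])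
  else st

def get_all_combinations_of_min_length (container_size_list : List Int) (amount : Int) : List (List Int) :=
  ((genA container_size_list amount).foldl stepA ((9999999 : Int), ([] : List (List Int)))).2

-- ===== PORT B =====
-- _sized: combinations of exactly `need` elements summing to `remaining`
def sizedB (lst : List Int) (remaining : Int) (need : Int) : List (List Int) :=
  if need = 0 then (if remaining = 0 then [[]] else [])
  else if (lst.length : Int) < need then []
  else
    match lst with
    | [] => []   -- totality guard: unreachable (Python raises here, only when need < 0)
    | first :: rest =>
      ((sizedB rest (remaining - first) (need - 1)).map (fun c => first :: c)) ++
      sizedB rest remaining need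

-- the `for k in range(1, min(len, 9999999) + 1)` loop with its early return
def altLoopB (l : List Int) (amount : Int) : List Int → List (List Int)
  | [] => []
  | k :: ks =>
    let results := sizedB l amount k
    if results = [] then altLoopB l amount ks else results

def get_all_combinations_of_min_length_alt (container_size_list : List Int) (amount : Int) : List (List Int) :=
  if amount = 0 then []
  else altLoopB container_size_list amount
        (PySem.List.pyRange 1 (min (container_size_list.length : Int) 9999999 + 1) 1)

-- ===== PRECONDITION & SPEC =====
def Spec_get_all_combinations_of_min_length (container_size_list : List Int) (amount : Int) (out : List (List Int)) : Prop := out = get_all_combinations_of_min_length_alt container_size_list amount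
instance (container_size_list : List Int) (amount : Int) (out : List (List Int)) : Decidable (Spec_get_all_combinations_of_min_length container_size_list amount out) := by unfold Spec_get_all_combinations_of_min_length; infer_instance

-- ===== CLAIM (what is proved, stated in full; the proofs are below) =====
def Claim_equal_get_all_combinations_of_min_length : Prop := ∀ (container_size_list : List Int) (amount : Int), Dom_get_all_combinations_of_min_length container_size_list amount → Spec_get_all_combinations_of_min_length container_size_list amount (get_all_combinations_of_min_length container_size_list amount)

-- ===== LEMMAS AND PROOFS =====

-- "no combination of fewer than k containers sums to a"
def NoSmall (l : List Int) (a : Int) (k : Int) : Prop :=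
  ∀ S : List Int, S.Sublist l → (S.length : Int) < k → S.sum ≠ a

lemma sizedB_zero (lst : List Int) (remaining : Int) :
    sizedB lst remaining 0 = if remaining = 0 then [[]] else [] := by
  rw [sizedB.eq_def]
  simp

lemma sizedB_of_short (lst : List Int) (a k : Int) (hk : k ≠ 0)
    (h : (lst.length : Int) < k) : sizedB lst a k = [] := by
  rw [sizedB.eq_def]
  simp [hk, h]

lemma sizedB_cons (x : Int) (rest : List Int) (a k : Int) (hk : k ≠ 0)
    (hlen : ¬ (((x :: rest).length : Int) < k)) :
    sizedB (x :: rest) a k =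
      ((sizedB rest (a - x) (k - 1)).map (fun c => x :: c)) ++ sizedB rest a k := by
  rw [sizedB.eq_def, if_neg hk, if_neg hlen]

lemma genA_zero (l : List Int) : genA l 0 = [] := by
  cases l <;> simp [genA]

lemma genA_mem {l : List Int} {a : Int} {c : List Int} (hc : c ∈ genA l a) :
    c ≠ [] ∧ c.Sublist l ∧ c.sum = a := by
  induction l generalizing a c with
  | nil => simp [genA] at hc
  | cons x rest ih =>
    simp only [genA] at hc
    by_cases ha : a = 0
    · simp [ha] at hc
    · simp only [ha, if_false, List.mem_append, List.mem_map] at hc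
      rcases hc with (hc | ⟨d, hd, rfl⟩) | hc
      · by_cases hx : x = a
        · subst hx
          simp at hc
          subst hc
          exact ⟨by simp, List.singleton_sublist.mpr (List.mem_cons_self), by simp⟩
        · simp [hx] at hc
      · obtain ⟨_, hdsub, hdsum⟩ := ih hd
        exact ⟨by simp, hdsub.cons₂ x, by simp [hdsum]⟩
      · obtain ⟨hne, hcsub, hcsum⟩ := ih hc
        exact ⟨hne, hcsub.cons x, hcsum⟩

lemma mem_genA_of_minimal {l : List Int} {a : Int} {S : List Int}
    (ha : a ≠ 0) (hsub : S.Sublist l) (hsum : S.sum = a)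
    (hmin : NoSmall l a (S.length : Int)) : S ∈ genA l a := by
  induction l generalizing a S with
  | nil =>
    rw [List.sublist_nil] at hsub
    subst hsub
    simp at hsum
    exact absurd hsum.symm ha
  | cons x rest ih =>
    simp only [genA, ha, if_false, List.mem_append, List.mem_map]
    rcases List.sublist_cons_iff.mp hsub with hS | ⟨T, rfl, hT⟩
    · refine Or.inr (ih ha hS hsum ?_)
      exact fun P hP hlen => hmin P (hP.cons x) hlen
    · rcases eq_or_ne T [] with rfl | hTne
      · simp only [List.sum_cons, List.sum_nil, add_zero] at hsum
        exact Or.inl (Or.inl (by simp [hsum]))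
      · have hxa : x ≠ a := by
          intro hx
          refine hmin [x] (List.singleton_sublist.mpr List.mem_cons_self) ?_ (by simpa using hx)
          have : 1 ≤ T.length := List.length_pos_iff.mpr hTne
          simp only [List.length_cons, List.length_nil]
          push_cast
          omega
        have hTsum : T.sum = a - x := by
          simp only [List.sum_cons] at hsum
          omega
        have hax : a - x ≠ 0 := fun h => hxa (by omega)
        have hmin' : NoSmall rest (a - x) (T.length : Int) := by
          intro P hP hlen hPsum
          refine hmin (x :: P) (hP.cons₂ x) ?_ (by simp [hPsum])
          simp only [List.length_cons]
          push_cast at hlen ⊢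
          omega
        exact Or.inl (Or.inr ⟨T, ih hax hT hTsum hmin', rfl⟩)

lemma sizedB_eq_filter : ∀ (l : List Int) (a k : Int), a ≠ 0 → 1 ≤ k → NoSmall l a k →
    sizedB l a k = (genA l a).filter (fun c => (c.length : Int) == k) := by
  intro l
  induction l with
  | nil =>
    intro a k _ hk _
    rw [sizedB_of_short [] a k (by omega) (by simp; omega)]
    simp [genA]
  | cons x rest ih =>
    intro a k ha hk hns
    have hrestr : NoSmall rest a k := fun P hP hlen => hns P (hP.cons x) hlen
    by_cases hlen : (((x :: rest).length : Int)) < k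
    · rw [sizedB_of_short _ a k (by omega) hlen]
      symm
      rw [List.filter_eq_nil_iff]
      intro c hc
      have hle : (c.length : Int) ≤ ((x :: rest).length : Int) :=
        Int.ofNat_le.mpr ((genA_mem hc).2.1.length_le)
      simp only [beq_iff_eq]
      omega
    · rw [sizedB_cons x rest a k (by omega) hlen]
      have hgen : genA (x :: rest) a =
          (if x = a then [[x]] else []) ++
          ((genA rest (a - x)).map (fun c => x :: c)) ++ genA rest a := by
        rw [genA, if_neg ha]
      rw [hgen, List.filter_append, List.filter_append, List.filter_map]
      have hmid : ((genA rest (a - x)).filter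
            ((fun c => (c.length : Int) == k) ∘ (fun c => x :: c))) =
          (genA rest (a - x)).filter (fun c => (c.length : Int) == k - 1) := by
        apply List.filter_congr
        intro c _
        simp only [Function.comp_apply, List.length_cons]
        push_cast
        by_cases h : (c.length : Int) = k - 1
        · have h1 : (((c.length : Int) + 1) == k) = true := by
            simp only [beq_iff_eq]; omega
          have h2 : (((c.length : Int)) == (k - 1)) = true := by
            simp only [beq_iff_eq]; omega
          rw [h1, h2]
        · have h1 : (((c.length : Int) + 1) == k) = false := by
            simp only [beq_eq_false_iff_ne, ne_eq]; omega
          have h2 : (((c.length : Int)) == (k - 1)) = false := by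
            simp only [beq_eq_false_iff_ne, ne_eq]; omega
          rw [h1, h2]
      rw [hmid]
      by_cases hk1 : k = 1
      · subst hk1
        have h0 : sizedB rest (a - x) 0 = if a - x = 0 then [[]] else [] :=
          sizedB_zero rest (a - x)
        have hnon : (genA rest (a - x)).filter (fun c => (c.length : Int) == (1 : Int) - 1) = [] := by
          rw [List.filter_eq_nil_iff]
          intro c hc
          have := (genA_mem hc).1
          simp only [beq_iff_eq]
          intro hlen0
          exact this (List.length_eq_zero_iff.mp (by omega))
        rw [hnon, show (1 : Int) - 1 = 0 from rfl, h0, ih a 1 ha le_rfl hrestr]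
        by_cases hxa : x = a
        · rw [if_pos hxa, if_pos (by omega)]
          simp
        · rw [if_neg hxa, if_neg (by intro h; exact hxa (by omega))]
          simp
      · have hk2 : 2 ≤ k := by omega
        have hxa : x ≠ a := by
          intro hx
          exact hns [x] (List.singleton_sublist.mpr List.mem_cons_self)
            (by simp; omega) (by simpa using hx)
        have hax : a - x ≠ 0 := fun h => hxa (by omega)
        have hns' : NoSmall rest (a - x) (k - 1) := by
          intro P hP hlenP hPsum
          refine hns (x :: P) (hP.cons₂ x) ?_ (by simp [hPsum])
          simp only [List.length_cons]
          push_cast at hlenP ⊢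
          omega
        rw [if_neg hxa, ih (a - x) (k - 1) hax (by omega) hns',
          ih a k ha hk hrestr]
        simp

-- minimum tracked by A's loop
def minFoldLen (L : List (List Int)) (m0 : Int) : Int :=
  L.foldl (fun m c => min m (c.length : Int)) m0

lemma minFoldLen_le_init (L : List (List Int)) (m0 : Int) : minFoldLen L m0 ≤ m0 := by
  induction L generalizing m0 with
  | nil => simp [minFoldLen]
  | cons c L ih =>
    calc minFoldLen (c :: L) m0 = minFoldLen L (min m0 (c.length : Int)) := rfl
    _ ≤ min m0 (c.length : Int) := ih _
    _ ≤ m0 := min_le_left _ _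

lemma minFoldLen_le_mem {L : List (List Int)} {c : List Int} (hc : c ∈ L) (m0 : Int) :
    minFoldLen L m0 ≤ (c.length : Int) := by
  induction L generalizing m0 with
  | nil => simp at hc
  | cons d L ih =>
    rcases List.mem_cons.mp hc with rfl | hc
    · calc minFoldLen (c :: L) m0 = minFoldLen L (min m0 (c.length : Int)) := rfl
      _ ≤ min m0 (c.length : Int) := minFoldLen_le_init _ _
      _ ≤ (c.length : Int) := min_le_right _ _
    · exact ih hc _

lemma minFoldLen_cases (L : List (List Int)) (m0 : Int) :
    minFoldLen L m0 = m0 ∨ ∃ c ∈ L, minFoldLen L m0 = (c.length : Int) := by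
  induction L generalizing m0 with
  | nil => exact Or.inl rfl
  | cons d L ih =>
    have hstep : minFoldLen (d :: L) m0 = minFoldLen L (min m0 (d.length : Int)) := rfl
    rcases ih (min m0 (d.length : Int)) with h | ⟨c, hc, h⟩
    · rcases le_total m0 ((d.length : Int)) with hle | hle
      · exact Or.inl (by rw [hstep, h, min_eq_left hle])
      · exact Or.inr ⟨d, List.mem_cons_self, by rw [hstep, h, min_eq_right hle]⟩
    · exact Or.inr ⟨c, List.mem_cons_of_mem _ hc, by rw [hstep, h]⟩

lemma foldA_char : ∀ (L : List (List Int)) (m0 : Int) (acc0 : List (List Int)),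
    L.foldl stepA (m0, acc0) =
      (minFoldLen L m0,
        if minFoldLen L m0 < m0 then L.filter (fun c => (c.length : Int) == minFoldLen L m0)
        else acc0 ++ L.filter (fun c => (c.length : Int) == m0)) := by
  intro L
  induction L with
  | nil => intro m0 acc0; simp [minFoldLen]
  | cons c L ih =>
    intro m0 acc0
    have hstep : minFoldLen (c :: L) m0 = minFoldLen L (min m0 (c.length : Int)) := rfl
    have hle : ∀ x : Int, minFoldLen L x ≤ x := fun x => minFoldLen_le_init L x
    rw [List.foldl_cons]
    rcases lt_trichotomy ((c.length : Int)) m0 with h | h | h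
    · rw [show stepA (m0, acc0) c = ((c.length : Int), [c]) from by
        simp [stepA, h], ih]
      have hm : minFoldLen (c :: L) m0 = minFoldLen L ((c.length : Int)) := by
        rw [hstep, min_eq_right (le_of_lt h)]
      have hcond : minFoldLen (c :: L) m0 < m0 := lt_of_le_of_lt (hm ▸ hle _) h
      rw [if_pos hcond, hm]
      rcases lt_or_eq_of_le (hle ((c.length : Int))) with h2 | h2
      · rw [if_pos h2, List.filter_cons, if_neg (by simp only [beq_iff_eq]; omega)]
      · rw [if_neg (by omega), h2, List.filter_cons, if_pos (by simp)]
        rfl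
    · rw [show stepA (m0, acc0) c = (m0, acc0 ++ [c]) from by
        simp [stepA, h], ih]
      have hm : minFoldLen (c :: L) m0 = minFoldLen L m0 := by
        rw [hstep, h, min_self]
      rw [hm]
      by_cases h2 : minFoldLen L m0 < m0
      · rw [if_pos h2, if_pos h2, List.filter_cons, if_neg (by simp only [beq_iff_eq]; omega)]
      · rw [if_neg h2, if_neg h2, List.filter_cons, if_pos (by simp only [beq_iff_eq]; omega),
          List.append_assoc]
        rfl
    · rw [show stepA (m0, acc0) c = (m0, acc0) from by
        simp only [stepA]; rw [if_neg (by omega), if_neg (by omega)], ih]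
      have hm : minFoldLen (c :: L) m0 = minFoldLen L m0 := by
        rw [hstep, min_eq_left (le_of_lt h)]
      rw [hm]
      by_cases h2 : minFoldLen L m0 < m0
      · rw [if_pos h2, if_pos h2, List.filter_cons,
          if_neg (by simp only [beq_iff_eq]; omega)]
      · rw [if_neg h2, if_neg h2, List.filter_cons,
          if_neg (by simp only [beq_iff_eq]; omega)]

lemma altLoopB_nil {l : List Int} {a : Int} {ks : List Int}
    (h : ∀ k ∈ ks, sizedB l a k = []) : altLoopB l a ks = [] := by
  induction ks with
  | nil => rfl
  | cons k ks ih =>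
    rw [altLoopB]
    simp only [h k List.mem_cons_self, if_pos]
    exact ih fun k' hk' => h k' (List.mem_cons_of_mem _ hk')

lemma altLoopB_pyRange {l : List Int} {a : Int} (lo hi m : Int)
    (hlom : lo ≤ m) (hmhi : m < hi)
    (hbelow : ∀ k, lo ≤ k → k < m → sizedB l a k = [])
    (hm : sizedB l a m ≠ []) :
    altLoopB l a (PySem.List.pyRange lo hi 1) = sizedB l a m := by
  have key : ∀ (n : Nat) (lo : Int), lo ≤ m → (m - lo).toNat = n →
      (∀ k, lo ≤ k → k < m → sizedB l a k = []) →
      altLoopB l a (PySem.List.pyRange lo hi 1) = sizedB l a m := by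
    intro n
    induction n with
    | zero =>
      intro lo hlom h0 _
      have hlo : lo = m := by omega
      subst hlo
      rw [PySem.List.pyRange_one_cons (by omega), altLoopB]
      simp only [if_neg hm]
    | succ n ih =>
      intro lo hlom hn hbelow
      have hlt : lo < m := by omega
      rw [PySem.List.pyRange_one_cons (by omega), altLoopB]
      simp only [hbelow lo le_rfl hlt, if_pos]
      exact ih (lo + 1) (by omega) (by omega) fun k hk1 hk2 => hbelow k (by omega) hk2
  exact key (m - lo).toNat lo hlom rfl hbelow

-- ===== VERDICT (by name: the statement is the Claim_ definition above) =====
theorem get_all_combinations_of_min_length_spec : Claim_equal_get_all_combinations_of_min_length := by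
  intro l a _
  unfold Spec_get_all_combinations_of_min_length
  unfold get_all_combinations_of_min_length get_all_combinations_of_min_length_alt
  by_cases ha : a = 0
  · subst ha
    simp [genA_zero]
  · rw [if_neg ha]
    by_cases hex : ∃ m : Nat, ∃ S : List Int, S.Sublist l ∧ S.sum = a ∧ S.length = m
    · haveI : DecidablePred fun m : Nat => ∃ S : List Int, S.Sublist l ∧ S.sum = a ∧ S.length = m :=
        fun _ => Classical.dec _
      obtain ⟨S, hSsub, hSsum, hSlen⟩ := Nat.find_spec hex
      set m : Nat := Nat.find hex with hmdef
      have hfindle : ∀ {c : List Int}, c.Sublist l → c.sum = a → m ≤ c.length :=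
        fun {c} h1 h2 => Nat.find_min' hex ⟨c, h1, h2, rfl⟩
      have hm1 : 1 ≤ m := by
        rcases eq_or_ne S [] with rfl | hSne
        · simp only [List.sum_nil] at hSsum
          exact absurd hSsum.symm ha
        · have := List.length_pos_iff.mpr hSne
          omega
      have hmn : m ≤ l.length := hSlen ▸ hSsub.length_le
      have hNoSmall : ∀ k : Int, k ≤ (m : Int) → NoSmall l a k := by
        intro k hk P hP hlen hPsum
        have := hfindle hP hPsum
        omega
      by_cases hm9 : (m : Int) ≤ 9999999
      · -- the minimal length is within A's acceptable range: both return level m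
        have hSmem : S ∈ genA l a :=
          mem_genA_of_minimal ha hSsub hSsum (by rw [hSlen]; exact hNoSmall _ le_rfl)
        have hminFold : minFoldLen (genA l a) 9999999 = (m : Int) := by
          apply le_antisymm
          · calc minFoldLen (genA l a) 9999999 ≤ (S.length : Int) := minFoldLen_le_mem hSmem _
            _ = (m : Int) := by exact_mod_cast hSlen
          · rcases minFoldLen_cases (genA l a) 9999999 with h | ⟨c, hc, h⟩
            · rw [h]; omega
            · obtain ⟨_, hcsub, hcsum⟩ := genA_mem hc
              have := hfindle hcsub hcsum
              rw [h]
              exact_mod_cast this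
        rw [foldA_char]
        by_cases hmeq : (m : Int) = 9999999
        · -- min length exactly 9999999: A keeps the elif branch, same filter
          rw [hminFold, hmeq, if_neg (by omega)]
          have hBm : sizedB l a (m : Int) = (genA l a).filter (fun c => (c.length : Int) == (m : Int)) :=
            sizedB_eq_filter l a (m : Int) ha (by exact_mod_cast hm1) (hNoSmall _ le_rfl)
          rw [altLoopB_pyRange 1 (min (l.length : Int) 9999999 + 1) (m : Int)
            (by exact_mod_cast hm1) (by omega)
            (fun k hk1 hk2 => by
              rw [sizedB_eq_filter l a k ha hk1 (hNoSmall k (le_of_lt hk2)), List.filter_eq_nil_iff]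
              intro c hc
              obtain ⟨_, hcsub, hcsum⟩ := genA_mem hc
              have := hfindle hcsub hcsum
              simp only [beq_iff_eq]
              omega)
            (by
              rw [hBm]
              intro hnil
              have : S ∈ (genA l a).filter (fun c => (c.length : Int) == (m : Int)) :=
                List.mem_filter.mpr ⟨hSmem, by simp [hSlen]⟩
              rw [hnil] at this
              simp at this)]
          rw [hBm, hmeq]
          simp
        · rw [hminFold, if_pos (by omega)]
          have hBm : sizedB l a (m : Int) = (genA l a).filter (fun c => (c.length : Int) == (m : Int)) :=
            sizedB_eq_filter l a (m : Int) ha (by exact_mod_cast hm1) (hNoSmall _ le_rfl)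
          rw [altLoopB_pyRange 1 (min (l.length : Int) 9999999 + 1) (m : Int)
            (by exact_mod_cast hm1) (by omega)
            (fun k hk1 hk2 => by
              rw [sizedB_eq_filter l a k ha hk1 (hNoSmall k (le_of_lt hk2)), List.filter_eq_nil_iff]
              intro c hc
              obtain ⟨_, hcsub, hcsum⟩ := genA_mem hc
              have := hfindle hcsub hcsum
              simp only [beq_iff_eq]
              omega)
            (by
              rw [hBm]
              intro hnil
              have : S ∈ (genA l a).filter (fun c => (c.length : Int) == (m : Int)) :=
                List.mem_filter.mpr ⟨hSmem, by simp [hSlen]⟩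
              rw [hnil] at this
              simp at this)]
          rw [hBm]
      · -- the minimal length exceeds 9999999: A's filter keeps nothing, B's capped loop is empty
        have hlong : ∀ c ∈ genA l a, 9999999 < (c.length : Int) := by
          intro c hc
          obtain ⟨_, hcsub, hcsum⟩ := genA_mem hc
          have := hfindle hcsub hcsum
          omega
        have hminFold : minFoldLen (genA l a) 9999999 = 9999999 := by
          rcases minFoldLen_cases (genA l a) 9999999 with h | ⟨c, hc, h⟩
          · exact h
          · have h1 := hlong c hc
            have h2 := minFoldLen_le_init (genA l a) 9999999
            omega
        rw [foldA_char, hminFold, if_neg (by omega)]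
        have hAnil : (genA l a).filter (fun c => (c.length : Int) == (9999999 : Int)) = [] := by
          rw [List.filter_eq_nil_iff]
          intro c hc
          have := hlong c hc
          simp only [beq_iff_eq]
          omega
        have hBnil : altLoopB l a (PySem.List.pyRange 1 (min (l.length : Int) 9999999 + 1) 1) = [] := by
          apply altLoopB_nil
          intro k hk
          obtain ⟨hk1, hk2⟩ := PySem.List.mem_pyRange_one.mp hk
          have hk9 : k ≤ 9999999 := le_trans (Int.lt_add_one_iff.mp hk2) (min_le_right _ _)
          rw [sizedB_eq_filter l a k ha hk1 (hNoSmall k (by omega)), List.filter_eq_nil_iff]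
          intro c hc
          have := hlong c hc
          simp only [beq_iff_eq]
          omega
        rw [hAnil, hBnil]
        rfl
    · have hgen : genA l a = [] := by
        rw [List.eq_nil_iff_forall_not_mem]
        intro c hc
        obtain ⟨_, hcsub, hcsum⟩ := genA_mem hc
        exact hex ⟨c.length, c, hcsub, hcsum, rfl⟩
      have hall : ∀ k ∈ PySem.List.pyRange 1 (min (l.length : Int) 9999999 + 1) 1, sizedB l a k = [] := by
        intro k hk
        have hk1 : 1 ≤ k := (PySem.List.mem_pyRange_one.mp hk).1
        have hns : NoSmall l a k := fun P hP _ hPsum => hex ⟨P.length, P, hP, hPsum, rfl⟩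
        rw [sizedB_eq_filter l a k ha hk1 hns, hgen]
        rfl
      rw [hgen, altLoopB_nil hall]
      rfl
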